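-- pv_equiv track=rewrite | github.com/zhenzhang93/UNSW | 9021/QUIZ/sample5.py | code_derived_set
-- ===== SOURCE A (Python) =====
-- from itertools import accumulate
--
-- def decode_set(encoded_set):
--     elements_in_decoded_set = []
--     encoded_set = [int(bit) for bit in reversed(f'{encoded_set:b}')]
--     for i in range(len(encoded_set) // 2 * 2 - 1, -1, -2):
--         if encoded_set[i]:
--             elements_in_decoded_set.append(-(i + 1) // 2)
--     for i in range(0, len(encoded_set) , 2):
--         if encoded_set[i]:
--             elements_in_decoded_set.append(i // 2)
--     return elements_in_decoded_set
--
-- def code_derived_set(encoded_set):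
--     encoded_running_sum = 0
--     running_sums = accumulate(decode_set(encoded_set))
--     for e in running_sums:
--         if e < 0:
--             encoded_running_sum |= 1 << (-e * 2 - 1)
--         else:
--             encoded_running_sum |= 1 << (e * 2)
--     return encoded_running_sum
-- ===== SOURCE B (Python) =====
-- def code_derived_set(encoded_set):
--     bits = [int(b) for b in reversed(f'{encoded_set:b}')]
--     vals = [i // 2 if i % 2 == 0 else -(i + 1) // 2 for i, b in enumerate(bits) if b]
--     vals.sort()
--     res = 0
--     s = 0
--     for v in vals:
--         s += v
--         res |= 1 << (2 * s if s >= 0 else -2 * s - 1)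
--     return res
-- ===== Notes on version B (the rewrite author's own statement) =====
-- stated objective: alternative
-- what changed: Replaces A's two opposite-direction strided index scans (which exploit the interleaved sign encoding to emit the decoded set already sorted) by a single enumerate pass that collects each set bit's value followed by an explicit ascending sort, then one accumulating pass that ORs the bit for each running sum.
import Mathlib
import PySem

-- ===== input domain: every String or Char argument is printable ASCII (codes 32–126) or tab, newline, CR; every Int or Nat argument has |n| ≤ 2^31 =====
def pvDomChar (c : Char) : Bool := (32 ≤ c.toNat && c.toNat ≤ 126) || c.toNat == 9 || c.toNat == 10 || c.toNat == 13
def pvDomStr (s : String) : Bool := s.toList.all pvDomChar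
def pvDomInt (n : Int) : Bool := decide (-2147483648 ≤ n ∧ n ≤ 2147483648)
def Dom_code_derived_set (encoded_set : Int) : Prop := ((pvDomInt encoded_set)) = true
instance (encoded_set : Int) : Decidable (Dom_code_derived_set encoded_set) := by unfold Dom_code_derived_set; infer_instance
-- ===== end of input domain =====

-- B replaces A's two opposite-direction index scans over the interleaved encoding by collect-then-sort
-- plus one accumulating pass (objective: alternative decomposition, same cost).

-- ===== PORT A =====
-- shared line of BOTH sources: `[int(b) for b in reversed(f'{n:b}')]`
-- (exact for n ≥ 0, guaranteed by Pre_: the digits are then only '0'/'1', so int(b) is this case split)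
def pvBits (n : Int) : List Int :=
  ((PySem.Int.toBinChars n).reverse).map (fun c => if c == '1' then (1:Int) else 0)

def code_derived_set (encoded_set : Int) : Int :=
  let bits := pvBits encoded_set
  let L : Nat := bits.length
  -- decode_set: descending scan of the odd positions, then ascending scan of the even positions
  -- (pyGetD with default 0 is exact: every index both ranges produce is in range)
  let negs := (PySem.List.pyRange (((L / 2 * 2 : Nat) : Int) - 1) (-1) (-2)).foldl
      (fun acc i => if PySem.List.pyGetD bits i 0 ≠ 0 then acc ++ [PySem.Int.floordiv (-(i+1)) 2] else acc) []
  let decoded := (PySem.List.pyRange 0 (L : Nat) 2).foldl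
      (fun acc i => if PySem.List.pyGetD bits i 0 ≠ 0 then acc ++ [PySem.Int.floordiv i 2] else acc) negs
  -- accumulate(decoded) consumed by the OR loop (running sum s; both shift amounts are ≥ 0, so .toNat is exact)
  (decoded.foldl (fun (st : Int × Int) e =>
      let s := st.1 + e
      (s, if s < 0 then PySem.Int.bor st.2 (1 <<< (-s*2-1).toNat) else PySem.Int.bor st.2 (1 <<< (s*2).toNat)))
    ((0:Int),(0:Int))).2

-- ===== PORT B =====
def code_derived_set_alt (encoded_set : Int) : Int :=
  let bits := pvBits encoded_set
  -- one pass: collect the value of every set bit, then sort ascending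
  let vals := ((PySem.List.enumerate bits).filter (fun p => decide (p.2 ≠ 0))).map
      (fun p => if PySem.Int.mod p.1 2 = 0 then PySem.Int.floordiv p.1 2 else PySem.Int.floordiv (-(p.1+1)) 2)
  let svals := PySem.List.sorted vals (fun x => x)
  -- walk the sorted list accumulating s and OR-ing the bit for s (shift amounts ≥ 0, .toNat exact)
  (svals.foldl (fun (st : Int × Int) v =>
      let s := st.1 + v
      (s, PySem.Int.bor st.2 (1 <<< ((if 0 ≤ s then 2*s else -2*s-1).toNat))))
    ((0:Int),(0:Int))).2

-- ===== PRECONDITION & SPEC =====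
-- Python A raises ValueError on encoded_set < 0 (f'{n:b}' then starts with '-', which int() rejects);
-- B raises there too, so those inputs are simply excluded.
def Pre_code_derived_set (encoded_set : Int) : Prop := 0 ≤ encoded_set
instance (encoded_set : Int) : Decidable (Pre_code_derived_set encoded_set) := by
  unfold Pre_code_derived_set; infer_instance
def pvWitness_code_derived_set : Int := 37
def Spec_code_derived_set (encoded_set : Int) (out : Int) : Prop := out = code_derived_set_alt encoded_set
instance (encoded_set : Int) (out : Int) : Decidable (Spec_code_derived_set encoded_set out) := by
  unfold Spec_code_derived_set; infer_instance

-- ===== CLAIM (what is proved, stated in full; the proofs are below) =====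
def Claim_equal_code_derived_set : Prop := ∀ (encoded_set : Int), Dom_code_derived_set encoded_set → Pre_code_derived_set encoded_set → Spec_code_derived_set encoded_set (code_derived_set encoded_set)

-- ===== LEMMAS AND PROOFS =====

-- range(len//2*2-1, -1, -2): the odd indices below 2*(L/2), descending
lemma pvRange_neg2 (m : Nat) :
    PySem.List.pyRange (((m * 2 : Nat) : Int) - 1) (-1) (-2)
      = (List.range m).map (fun (k : Nat) => ((m * 2 : Nat) : Int) - 1 - 2 * (k : Int)) := by
  unfold PySem.List.pyRange
  norm_num
  rw [show (((m : Int) * 2 + 2 - 1) / 2).toNat = m from by omega,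
      show (if 0 < m then m else 0) = m from by split_ifs with h <;> omega]
  apply List.map_congr_left
  intro k _
  ring

-- range(0, len, 2): the even indices below L, ascending
lemma pvRange_pos2 (L : Nat) :
    PySem.List.pyRange 0 (L : Nat) 2
      = (List.range ((L + 1) / 2)).map (fun (k : Nat) => (2 * (k : Int) : Int)) := by
  unfold PySem.List.pyRange
  norm_num
  rcases Nat.eq_zero_or_pos L with h | h
  · subst h; simp
  · rw [if_pos (by exact_mod_cast h)]
    rw [show (((L : Int) + 2 - 1) / 2).toNat = (L + 1) / 2 from by omega]

-- descending odds ++ ascending evens is a rearrangement of range(L)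
lemma pvPerm (L : Nat) :
    (((List.range (L / 2)).map (fun (k : Nat) => ((L / 2 * 2 : Nat) : Int) - 1 - 2 * (k : Int)))
      ++ ((List.range ((L + 1) / 2)).map (fun (k : Nat) => (2 * (k : Int) : Int)))).Perm
      (PySem.List.pyRange 0 (L : Nat) 1) := by
  rw [List.perm_ext_iff_of_nodup]
  · intro a
    simp only [List.mem_append, List.mem_map, List.mem_range, PySem.List.mem_pyRange_one]
    constructor
    · rintro (⟨k, hk, rfl⟩ | ⟨k, hk, rfl⟩) <;> (push_cast; omega)
    · rintro ⟨h0, hL⟩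
      rcases Int.even_or_odd a with ⟨t, rfl⟩ | ⟨t, rfl⟩
      · right; exact ⟨t.toNat, by omega, by omega⟩
      · left; exact ⟨L / 2 - 1 - t.toNat, by omega, by push_cast; omega⟩
  · apply List.Nodup.append
    · exact List.Nodup.map (fun k1 k2 h => by push_cast at h; omega) List.nodup_range
    · exact List.Nodup.map (fun k1 k2 h => by omega) List.nodup_range
    · intro a ha hb
      simp only [List.mem_map, List.mem_range] at ha hb
      obtain ⟨k1, _, rfl⟩ := ha
      obtain ⟨k2, _, h⟩ := hb
      omega
  · exact PySem.List.nodup_pyRange_one 0 L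

-- the central fact: B's sorted collected values = A's negatives-ascending ++ nonnegatives-ascending
lemma pvDecode_eq (bits : List Int) :
    PySem.List.sorted
      (((PySem.List.enumerate bits).filter (fun p => decide (p.2 ≠ 0))).map
        (fun p => if PySem.Int.mod p.1 2 = 0 then PySem.Int.floordiv p.1 2 else PySem.Int.floordiv (-(p.1+1)) 2))
      (fun x => x)
    = ((PySem.List.pyRange (((bits.length / 2 * 2 : Nat) : Int) - 1) (-1) (-2)).filter
          (fun i => decide (PySem.List.pyGetD bits i 0 ≠ 0))).map (fun i => PySem.Int.floordiv (-(i+1)) 2)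
      ++ ((PySem.List.pyRange 0 (bits.length : Nat) 2).filter
          (fun i => decide (PySem.List.pyGetD bits i 0 ≠ 0))).map (fun i => PySem.Int.floordiv i 2) := by
  set L := bits.length with hL
  set Q : Int → Bool := fun i => decide (PySem.List.pyGetD bits i 0 ≠ 0) with hQ
  set V : Int → Int := fun i => if PySem.Int.mod i 2 = 0 then PySem.Int.floordiv i 2
                                else PySem.Int.floordiv (-(i+1)) 2 with hV
  -- B's collected values, as a filtered map over range(L)
  have hvals :
      ((PySem.List.enumerate bits).filter (fun p => decide (p.2 ≠ 0))).map
        (fun p => if PySem.Int.mod p.1 2 = 0 then PySem.Int.floordiv p.1 2 else PySem.Int.floordiv (-(p.1+1)) 2)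
      = ((PySem.List.pyRange 0 (L : Nat) 1).filter Q).map V := by
    rw [PySem.List.enumerate_eq_map_pyRange bits 0, List.filter_map, List.map_map]
    rfl
  have hneg1 :
      ((PySem.List.pyRange (((L / 2 * 2 : Nat) : Int) - 1) (-1) (-2)).filter Q).map
          (fun i => PySem.Int.floordiv (-(i+1)) 2)
      = (((List.range (L / 2)).map (fun (k : Nat) => ((L / 2 * 2 : Nat) : Int) - 1 - 2 * (k : Int))).filter Q).map
          (fun i => PySem.Int.floordiv (-(i+1)) 2) := by
    rw [pvRange_neg2]
  have hodd : ∀ i ∈ ((List.range (L / 2)).map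
        (fun (k : Nat) => ((L / 2 * 2 : Nat) : Int) - 1 - 2 * (k : Int))).filter Q,
      PySem.Int.floordiv (-(i+1)) 2 = V i := by
    intro i hi
    have hi' := List.mem_of_mem_filter hi
    simp only [List.mem_map, List.mem_range] at hi'
    obtain ⟨k, hk, rfl⟩ := hi'
    rw [hV]
    have hm : PySem.Int.mod (((L / 2 * 2 : Nat) : Int) - 1 - 2 * (k : Int)) 2 ≠ 0 := by
      rw [PySem.Int.mod_eq_emod_of_pos (by norm_num)]
      omega
    simp only [if_neg hm]
  have hneg2 :
      (((List.range (L / 2)).map (fun (k : Nat) => ((L / 2 * 2 : Nat) : Int) - 1 - 2 * (k : Int))).filter Q).map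
          (fun i => PySem.Int.floordiv (-(i+1)) 2)
      = (((List.range (L / 2)).filter (fun (k : Nat) => Q (((L / 2 * 2 : Nat) : Int) - 1 - 2 * (k : Int)))).map
          (fun (k : Nat) => ((k : Int) - (L / 2 : Nat)))) := by
    rw [List.filter_map, List.map_map]
    apply List.map_congr_left
    intro k _
    simp only [Function.comp]
    rw [show (-((((L / 2 * 2 : Nat) : Int) - 1 - 2 * (k : Int)) + 1)) = 2 * ((k : Int) - ((L / 2 : Nat) : Int)) from by push_cast; ring,
        PySem.Int.floordiv_eq_ediv_of_pos (by norm_num), Int.mul_ediv_cancel_left _ (by norm_num)]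
  have hpos1 :
      ((PySem.List.pyRange 0 (L : Nat) 2).filter Q).map (fun i => PySem.Int.floordiv i 2)
      = (((List.range ((L + 1) / 2)).map (fun (k : Nat) => (2 * (k : Int) : Int))).filter Q).map
          (fun i => PySem.Int.floordiv i 2) := by
    rw [pvRange_pos2]
  have heven : ∀ i ∈ ((List.range ((L + 1) / 2)).map (fun (k : Nat) => (2 * (k : Int) : Int))).filter Q,
      PySem.Int.floordiv i 2 = V i := by
    intro i hi
    have hi' := List.mem_of_mem_filter hi
    simp only [List.mem_map, List.mem_range] at hi'
    obtain ⟨k, hk, rfl⟩ := hi'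
    rw [hV]
    have hm : PySem.Int.mod (2 * (k : Int)) 2 = 0 := by
      rw [PySem.Int.mod_eq_emod_of_pos (by norm_num)]
      omega
    simp only [if_pos hm]
  have hpos2 :
      (((List.range ((L + 1) / 2)).map (fun (k : Nat) => (2 * (k : Int) : Int))).filter Q).map
          (fun i => PySem.Int.floordiv i 2)
      = ((List.range ((L + 1) / 2)).filter (fun (k : Nat) => Q (2 * (k : Int)))).map
          (fun (k : Nat) => ((k : Nat) : Int)) := by
    rw [List.filter_map, List.map_map]
    apply List.map_congr_left
    intro k _
    simp only [Function.comp]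
    rw [PySem.Int.floordiv_eq_ediv_of_pos (by norm_num), Int.mul_ediv_cancel_left _ (by norm_num)]
  rw [hvals]
  apply PySem.List.sorted_eq_of_perm_of_pairwise_lt
  · -- the two-scan output is a rearrangement of the collected values
    rw [hneg1, hpos1, List.map_congr_left hodd, List.map_congr_left heven,
        ← List.map_append, ← List.filter_append]
    exact List.Perm.map V (List.Perm.filter Q (pvPerm L))
  · -- and it is strictly increasing
    rw [hneg1, hpos1, hneg2, hpos2, List.pairwise_append]
    refine ⟨?_, ?_, ?_⟩
    · rw [List.pairwise_map]
      exact List.Pairwise.imp (fun h => by omega)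
        (List.Pairwise.sublist List.filter_sublist List.pairwise_lt_range)
    · rw [List.pairwise_map]
      exact List.Pairwise.imp (fun h => by omega)
        (List.Pairwise.sublist List.filter_sublist List.pairwise_lt_range)
    · intro a ha b hb
      simp only [List.mem_map] at ha hb
      obtain ⟨k1, hk1, rfl⟩ := ha
      obtain ⟨k2, hk2, rfl⟩ := hb
      have := List.mem_range.mp (List.mem_of_mem_filter hk1)
      omega

-- the two OR-accumulating loop bodies are the same function
lemma pvStep_eq :
    (fun (st : Int × Int) e =>
      let s := st.1 + e
      (s, if s < 0 then PySem.Int.bor st.2 (1 <<< (-s*2-1).toNat) else PySem.Int.bor st.2 (1 <<< (s*2).toNat)))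
    = (fun (st : Int × Int) v =>
      let s := st.1 + v
      (s, PySem.Int.bor st.2 (1 <<< ((if 0 ≤ s then 2*s else -2*s-1).toNat)))) := by
  funext st e
  by_cases h : st.1 + e < 0
  · simp only [if_pos h, if_neg (by omega : ¬ 0 ≤ st.1 + e)]
    rw [show -(st.1 + e)*2-1 = -2*(st.1 + e)-1 from by ring]
  · simp only [if_neg h, if_pos (by omega : 0 ≤ st.1 + e)]
    rw [show (st.1 + e)*2 = 2*(st.1 + e) from by ring]

-- ===== VERDICT (by name: the statement is the Claim_ definition above) =====
theorem code_derived_set_spec : Claim_equal_code_derived_set := by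
  intro n _ _
  unfold Spec_code_derived_set code_derived_set code_derived_set_alt
  dsimp only
  rw [PySem.List.foldl_append_ite, PySem.List.foldl_append_ite, List.nil_append,
      pvDecode_eq (pvBits n), pvStep_eq]
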